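-- pv_equiv track=rewrite | github.com/loning/mbook-binary | src/binaryuniverse/tests/test_T7_1.py | _detect_symmetric_nesting
-- ===== SOURCE A (Python) =====
-- def _detect_symmetric_nesting(S: str) -> int:
--     """检测对称嵌套结构的深度"""
--     n = len(S)
--
--     # 检查是否是1...10...01...1这样的对称嵌套
--     if n >= 6:  # 至少需要6位才能有3层嵌套
--         # 计算前导1的个数
--         leading_ones = 0
--         for c in S:
--             if c == '1':
--                 leading_ones += 1
--             else:
--                 break
--
--         # 计算尾部1的个数
--         trailing_ones = 0
--         for c in reversed(S):
--             if c == '1':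
--                 trailing_ones += 1
--             else:
--                 break
--
--         # 检查是否对称
--         if leading_ones == trailing_ones and leading_ones >= 3:
--             # 验证中间是否都是0
--             middle = S[leading_ones:-trailing_ones]
--             if middle and all(c == '0' for c in middle):
--                 return leading_ones
--
--     return 0
-- ===== SOURCE B (Python) =====
-- def _detect_symmetric_nesting(S: str) -> int:
--     """Single forward pass: split S into three maximal runs 1..1 / 0..0 / 1..1 and
--     check the shape arithmetically on the run boundaries."""
--     n = len(S)
--     i = 0
--     while i < n and S[i] == '1':
--         i += 1
--     j = i
--     while j < n and S[j] == '0':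
--         j += 1
--     k = j
--     while k < n and S[k] == '1':
--         k += 1
--     if k == n and i >= 3 and j > i and k - j == i:
--         return i
--     return 0
-- ===== Notes on version B (the rewrite author's own statement) =====
-- stated objective: alternative
-- what changed: Replaces A's two scans from opposite ends plus a slice-and-check of the middle with one forward pass that splits S into its three maximal runs (1s, 0s, 1s) and validates the shape by run-boundary arithmetic alone.
import Mathlib
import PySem

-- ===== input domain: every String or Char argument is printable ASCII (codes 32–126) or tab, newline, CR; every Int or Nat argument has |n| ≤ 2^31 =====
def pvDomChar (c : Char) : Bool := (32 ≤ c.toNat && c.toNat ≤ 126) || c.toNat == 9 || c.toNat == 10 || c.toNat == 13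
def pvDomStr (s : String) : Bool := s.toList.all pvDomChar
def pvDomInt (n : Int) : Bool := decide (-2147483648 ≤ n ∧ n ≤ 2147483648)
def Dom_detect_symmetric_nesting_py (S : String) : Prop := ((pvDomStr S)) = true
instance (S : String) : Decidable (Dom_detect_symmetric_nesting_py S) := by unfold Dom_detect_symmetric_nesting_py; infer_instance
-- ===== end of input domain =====

-- B differs from A: one forward pass over three maximal runs with boundary arithmetic,
-- instead of A's two scans from opposite ends plus a slice-and-check of the middle.

-- ===== PORT A =====
-- "for c in S: if c == '1': leading_ones += 1 else: break" — counts the leading run of '1's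
def pvLeadOnes : List Char → Nat
  | [] => 0
  | c :: r => if c = '1' then pvLeadOnes r + 1 else 0

def detect_symmetric_nesting_py (S : String) : Int :=
  let L := S.toList
  let n := L.length
  if 6 ≤ n then
    let leading := pvLeadOnes L
    let trailing := pvLeadOnes L.reverse          -- "for c in reversed(S)"
    if leading = trailing ∧ 3 ≤ leading then
      let middle := PySem.List.slice L (some (leading : Int)) (some (-(trailing : Int)))  -- S[leading_ones:-trailing_ones]
      if middle ≠ [] ∧ middle.all (· = '0') then (leading : Int) else 0
    else 0
  else 0

-- ===== PORT B =====
-- "while i < n and S[i] == c: i += 1" starting at the head of the remaining list: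
-- length of the maximal run of c at the front
def pvRunLen (c : Char) : List Char → Nat
  | [] => 0
  | d :: r => if d = c then pvRunLen c r + 1 else 0

def detect_symmetric_nesting_py_alt (S : String) : Int :=
  let L := S.toList
  let n := L.length
  let i := pvRunLen '1' L
  let j := i + pvRunLen '0' (L.drop i)
  let k := j + pvRunLen '1' (L.drop j)
  if k = n ∧ 3 ≤ i ∧ i < j ∧ k - j = i then (i : Int) else 0

-- ===== PRECONDITION & SPEC =====
def Spec_detect_symmetric_nesting_py (S : String) (out : Int) : Prop := out = detect_symmetric_nesting_py_alt S
instance (S : String) (out : Int) : Decidable (Spec_detect_symmetric_nesting_py S out) := by unfold Spec_detect_symmetric_nesting_py; infer_instance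

-- ===== CLAIM (what is proved, stated in full; the proofs are below) =====
def Claim_equal_detect_symmetric_nesting_py : Prop := ∀ (S : String), Dom_detect_symmetric_nesting_py S → Spec_detect_symmetric_nesting_py S (detect_symmetric_nesting_py S)

-- ===== LEMMAS AND PROOFS =====

-- the canonical shape both programs recognise
def pvForm (L : List Char) (k b : Nat) : Prop :=
  3 ≤ k ∧ 1 ≤ b ∧ L = List.replicate k '1' ++ List.replicate b '0' ++ List.replicate k '1'

theorem pvRunLen_replicate_append (c : Char) (k : Nat) (t : List Char) :
    pvRunLen c (List.replicate k c ++ t) = k + pvRunLen c t := by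
  induction k with
  | zero => simp
  | succ m ih => simp [List.replicate_succ, pvRunLen, ih]; omega

theorem pvRunLen_cons_ne (c d : Char) (t : List Char) (h : d ≠ c) :
    pvRunLen c (d :: t) = 0 := by simp [pvRunLen, h]

theorem pvLeadOnes_eq_runLen (L : List Char) : pvLeadOnes L = pvRunLen '1' L := by
  induction L with
  | nil => rfl
  | cons c r ih => simp [pvLeadOnes, pvRunLen, ih]

-- maximality / decomposition of the run
theorem pvRunLen_take (c : Char) (L : List Char) :
    L.take (pvRunLen c L) = List.replicate (pvRunLen c L) c := by
  induction L with
  | nil => simp [pvRunLen]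
  | cons d r ih =>
      by_cases h : d = c
      · subst h; simp [pvRunLen, List.replicate_succ, ih]
      · simp [pvRunLen, h]

theorem pvRunLen_le_length (c : Char) (L : List Char) : pvRunLen c L ≤ L.length := by
  induction L with
  | nil => simp [pvRunLen]
  | cons d r ih =>
      by_cases h : d = c
      · simp [pvRunLen, h]; omega
      · simp [pvRunLen, h]

-- B on the canonical form
theorem pvB_form (S : String) (k b : Nat) (h : pvForm S.toList k b) :
    detect_symmetric_nesting_py_alt S = (k : Int) := by
  obtain ⟨hk, hb, hL⟩ := h
  have h1 : List.replicate k '1' = '1' :: List.replicate (k-1) '1' := by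
    cases k with | zero => omega | succ m => simp [List.replicate_succ]
  have h0 : List.replicate b '0' = '0' :: List.replicate (b-1) '0' := by
    cases b with | zero => omega | succ m => simp [List.replicate_succ]
  have hi : pvRunLen '1' S.toList = k := by
    rw [hL, List.append_assoc, pvRunLen_replicate_append, h0, List.cons_append,
        pvRunLen_cons_ne '1' '0' _ (by decide)]
    omega
  have hd1 : S.toList.drop k = List.replicate b '0' ++ List.replicate k '1' := by
    rw [hL, List.append_assoc]
    exact List.drop_left' (by simp)
  have hj : pvRunLen '0' (S.toList.drop k) = b := by
    rw [hd1, pvRunLen_replicate_append, h1, pvRunLen_cons_ne '0' '1' _ (by decide)]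
    omega
  have hd2 : S.toList.drop (k + b) = List.replicate k '1' := by
    rw [hL]
    exact List.drop_left' (by simp)
  have hk2 : pvRunLen '1' (S.toList.drop (k + b)) = k := by
    rw [hd2, ← List.append_nil (List.replicate k '1'), pvRunLen_replicate_append]
    simp [pvRunLen]
  have hn : S.toList.length = k + b + k := by simp [hL]; omega
  simp only [detect_symmetric_nesting_py_alt, hi, hj, hk2, hn]
  split
  case isTrue => rfl
  case isFalse hcond => exact absurd ⟨trivial, hk, by omega, by omega⟩ hcond

-- B nonzero only on the canonical form
theorem pvB_pos (S : String) (h : detect_symmetric_nesting_py_alt S ≠ 0) :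
    ∃ k b, pvForm S.toList k b ∧ detect_symmetric_nesting_py_alt S = (k : Int) := by
  simp only [detect_symmetric_nesting_py_alt] at h ⊢
  split at h
  case isFalse => exact absurd rfl h
  case isTrue hc =>
    obtain ⟨hn, hi3, hij, hkj⟩ := hc
    set L := S.toList with hLdef
    set i := pvRunLen '1' L with hidef
    set r0 := pvRunLen '0' (L.drop i) with hr0def
    set r1 := pvRunLen '1' (L.drop (i + r0)) with hr1def
    have ht1 : L.take i = List.replicate i '1' := pvRunLen_take '1' L
    have ht2 : (L.drop i).take r0 = List.replicate r0 '0' := pvRunLen_take '0' (L.drop i)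
    have ht3 : (L.drop (i + r0)).take r1 = List.replicate r1 '1' := pvRunLen_take '1' (L.drop (i + r0))
    have hr1i : r1 = i := by omega
    have hrest : (L.drop (i + r0)).drop r1 = [] := by
      rw [List.drop_drop]
      apply List.drop_eq_nil_of_le
      omega
    have hform : L = List.replicate i '1' ++ List.replicate r0 '0' ++ List.replicate i '1' := by
      calc L = L.take i ++ L.drop i := (List.take_append_drop i L).symm
        _ = L.take i ++ ((L.drop i).take r0 ++ (L.drop i).drop r0) := by
              rw [List.take_append_drop r0]
        _ = L.take i ++ ((L.drop i).take r0 ++ L.drop (i + r0)) := by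
              rw [List.drop_drop]
        _ = L.take i ++ ((L.drop i).take r0 ++ ((L.drop (i+r0)).take r1 ++ (L.drop (i+r0)).drop r1)) := by
              rw [List.take_append_drop]
        _ = List.replicate i '1' ++ (List.replicate r0 '0' ++ List.replicate i '1') := by
              rw [ht1, ht2, ht3, hrest, hr1i, List.append_nil]
        _ = List.replicate i '1' ++ List.replicate r0 '0' ++ List.replicate i '1' := by
              rw [List.append_assoc]
    exact ⟨i, r0, ⟨hi3, by omega, hform⟩, by rw [if_pos ⟨hn, hi3, hij, hkj⟩]⟩

-- the slice S[a:-a] for 0 < a ≤ len, written as clamped drop/take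
theorem pvSlice_eq (L : List Char) (k : Nat) (hk : 0 < k) (hkn : k ≤ L.length) :
    PySem.List.slice L (some (k : Int)) (some (-(k : Int))) = (L.drop k).take (L.length - k - k) := by
  simp [PySem.List.slice, PySem.List.clampIdx_neg_natCast _ _ hk, Nat.min_eq_left hkn]

-- A on the canonical form
theorem pvA_form (S : String) (k b : Nat) (h : pvForm S.toList k b) :
    detect_symmetric_nesting_py S = (k : Int) := by
  obtain ⟨hk, hb, hL⟩ := h
  have h1 : List.replicate k '1' = '1' :: List.replicate (k-1) '1' := by
    cases k with | zero => omega | succ m => simp [List.replicate_succ]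
  have h0 : List.replicate b '0' = '0' :: List.replicate (b-1) '0' := by
    cases b with | zero => omega | succ m => simp [List.replicate_succ]
  have hlead : pvLeadOnes S.toList = k := by
    rw [pvLeadOnes_eq_runLen, hL, List.append_assoc, pvRunLen_replicate_append, h0,
        List.cons_append, pvRunLen_cons_ne '1' '0' _ (by decide)]
    omega
  have hrev : S.toList.reverse = List.replicate k '1' ++ List.replicate b '0' ++ List.replicate k '1' := by
    rw [hL]
    simp [List.reverse_append, List.append_assoc]
  have htrail : pvLeadOnes S.toList.reverse = k := by
    rw [pvLeadOnes_eq_runLen, hrev, List.append_assoc, pvRunLen_replicate_append, h0,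
        List.cons_append, pvRunLen_cons_ne '1' '0' _ (by decide)]
    omega
  have hn : S.toList.length = k + b + k := by simp [hL]; omega
  have hmid : PySem.List.slice S.toList (some (k : Int)) (some (-(k : Int))) = List.replicate b '0' := by
    rw [pvSlice_eq S.toList k (by omega) (by omega), hn]
    have hd1 : S.toList.drop k = List.replicate b '0' ++ List.replicate k '1' := by
      rw [hL, List.append_assoc]
      exact List.drop_left' (by simp)
    rw [hd1, show k + b + k - k - k = b by omega]
    exact List.take_left' (by simp)
  simp only [detect_symmetric_nesting_py, hlead, htrail, hn, hmid]
  rw [if_pos (by omega : 6 ≤ k + b + k), if_pos ⟨trivial, hk⟩,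
      if_pos ⟨by simp [h0], by simp⟩]

-- A nonzero only on the canonical form
theorem pvA_pos (S : String) (h : detect_symmetric_nesting_py S ≠ 0) :
    ∃ k b, pvForm S.toList k b ∧ detect_symmetric_nesting_py S = (k : Int) := by
  simp only [detect_symmetric_nesting_py] at h ⊢
  set L := S.toList with hLdef
  set n := L.length with hndef
  set l := pvLeadOnes L with hldef
  set t := pvLeadOnes L.reverse with htdef
  split at h
  case isFalse => exact absurd rfl h
  case isTrue h6 =>
  split at h
  case isFalse => exact absurd rfl h
  case isTrue hlt =>
  split at h
  case isFalse => exact absurd rfl h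
  case isTrue hmid =>
  obtain ⟨hle, hl3⟩ := hlt
  obtain ⟨hne, hall⟩ := hmid
  have hln : l ≤ n := by rw [hldef, pvLeadOnes_eq_runLen]; exact pvRunLen_le_length '1' L
  have htn : t ≤ n := by
    rw [htdef, pvLeadOnes_eq_runLen, hndef, ← List.length_reverse]
    exact pvRunLen_le_length '1' L.reverse
  have hslice : PySem.List.slice L (some (l : Int)) (some (-(t : Int))) =
      (L.drop l).take (n - t - l) := by
    rw [← hle]
    exact pvSlice_eq L l (by omega) hln
  rw [hslice] at hne hall ⊢
  have hblen : ((L.drop l).take (n - t - l)).length = n - t - l := by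
    simp [hndef]
    omega
  have hb1 : 1 ≤ n - t - l := by
    by_contra hc
    apply hne
    have : (n - t - l) = 0 := by omega
    simp [this]
  -- the middle is a block of zeros
  have hm : (L.drop l).take (n - t - l) = List.replicate (n - t - l) '0' := by
    rw [List.eq_replicate_iff]
    refine ⟨hblen, ?_⟩
    intro c hc
    have := List.all_eq_true.mp hall c hc
    simpa using this
  -- leading run
  have htake : L.take l = List.replicate l '1' := by
    rw [hldef, pvLeadOnes_eq_runLen]
    exact pvRunLen_take '1' L
  -- trailing run
  have hdropend : L.drop (n - t) = List.replicate t '1' := by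
    have hr : L.reverse.take t = List.replicate t '1' := by
      rw [htdef, pvLeadOnes_eq_runLen]
      exact pvRunLen_take '1' L.reverse
    have hsplit : L = (L.reverse.drop t).reverse ++ List.replicate t '1' := by
      conv_lhs => rw [← List.reverse_reverse L]
      rw [← List.take_append_drop t L.reverse, List.reverse_append, hr]
      simp
    rw [hsplit]
    apply List.drop_left'
    simp [hndef]
  have hform : L = List.replicate l '1' ++ List.replicate (n - t - l) '0' ++ List.replicate t '1' := by
    calc L = L.take l ++ L.drop l := (List.take_append_drop l L).symm
      _ = L.take l ++ ((L.drop l).take (n - t - l) ++ (L.drop l).drop (n - t - l)) := by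
            rw [List.take_append_drop (n - t - l)]
      _ = L.take l ++ ((L.drop l).take (n - t - l) ++ L.drop (n - t)) := by
            rw [List.drop_drop, show l + (n - t - l) = n - t by omega]
      _ = List.replicate l '1' ++ (List.replicate (n - t - l) '0' ++ List.replicate t '1') := by
            rw [htake, hm, hdropend]
      _ = List.replicate l '1' ++ List.replicate (n - t - l) '0' ++ List.replicate t '1' := by
            rw [List.append_assoc]
  refine ⟨l, n - t - l, ⟨hl3, hb1, ?_⟩, ?_⟩
  · rw [hform, hle]
  · rw [if_pos h6, if_pos ⟨hle, hl3⟩, if_pos ⟨hne, hall⟩]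

-- ===== VERDICT (by name: the statement is the Claim_ definition above) =====
theorem detect_symmetric_nesting_py_spec : Claim_equal_detect_symmetric_nesting_py := by
  intro S _
  unfold Spec_detect_symmetric_nesting_py
  by_cases hA : detect_symmetric_nesting_py S = 0
  · by_cases hB : detect_symmetric_nesting_py_alt S = 0
    · rw [hA, hB]
    · obtain ⟨k, b, hf, _⟩ := pvB_pos S hB
      have := pvA_form S k b hf
      have hk3 := hf.1
      rw [this] at hA
      omega
  · obtain ⟨k, b, hf, hval⟩ := pvA_pos S hA
    rw [hval, pvB_form S k b hf]
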